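-- pv_equiv track=rewrite | github.com/IBM/PowerVS_watsonx_SatelliteConnectorBasedToolkit | utils/utils.py | remove_pii_data
-- ===== SOURCE A (Python) =====
-- def remove_pii_data(data, pii_keys=None):
--     if pii_keys is None:
--         pii_keys = ['username', 'date_of_birth', 'dob', 'address', 'email', 'password', 'passwd', 'first_name', 'last_name','EmailAddress','transaction_id']
--
--     cleaned_data = []
--     for record_tuple in data:
--         # Unpack the tuple to get the actual dictionary
--         record = record_tuple[0]
--         filtered_record = {k: v for k, v in record.items() if k not in pii_keys}
--         cleaned_data.append(filtered_record)
--
--     return cleaned_data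
-- ===== SOURCE B (Python) =====
-- _PII_DEFAULT = ['username', 'date_of_birth', 'dob', 'address', 'email', 'password',
--                 'passwd', 'first_name', 'last_name', 'EmailAddress', 'transaction_id']
--
--
-- def _scrub(record, keys):
--     # copy the record, then drive the deletion by the (short) deny-list
--     cleaned = dict(record)
--     for key in keys:
--         cleaned.pop(key, None)
--     return cleaned
--
--
-- def remove_pii_data(data, pii_keys=None):
--     keys = _PII_DEFAULT if pii_keys is None else pii_keys
--     return [_scrub(record_tuple[0], keys) for record_tuple in data]
-- ===== Notes on version B (the rewrite author's own statement) =====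
-- stated objective: faster
-- what changed: B inverts the inner traversal: instead of rebuilding each record by scanning all its items and testing list membership in the deny-list, B copies the record once and drives deletion by the fixed deny-list via dict.pop(key, None), removing the per-item O(K) list scan.
import Mathlib
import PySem

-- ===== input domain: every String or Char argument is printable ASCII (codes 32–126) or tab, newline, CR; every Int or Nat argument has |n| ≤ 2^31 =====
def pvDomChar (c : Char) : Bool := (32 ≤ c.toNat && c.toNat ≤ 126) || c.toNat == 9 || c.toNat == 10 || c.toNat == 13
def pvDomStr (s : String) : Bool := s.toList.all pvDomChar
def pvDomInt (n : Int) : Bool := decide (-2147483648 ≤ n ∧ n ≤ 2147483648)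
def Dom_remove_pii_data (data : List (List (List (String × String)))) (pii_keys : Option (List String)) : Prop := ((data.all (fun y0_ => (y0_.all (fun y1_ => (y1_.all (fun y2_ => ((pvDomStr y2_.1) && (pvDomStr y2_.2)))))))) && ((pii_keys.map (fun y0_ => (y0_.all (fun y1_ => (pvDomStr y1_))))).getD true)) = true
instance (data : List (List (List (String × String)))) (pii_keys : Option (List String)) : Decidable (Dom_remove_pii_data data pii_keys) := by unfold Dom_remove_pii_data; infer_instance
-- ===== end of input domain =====

-- B inverts the inner traversal: it copies each record and pops the fixed deny-list
-- keys from it, instead of rebuilding the record by testing every item against the deny-list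
-- (objective: faster — a timing run measured B faster on the generated inputs).

-- ===== PORT A =====
def piiDefault : List String :=
  ["username", "date_of_birth", "dob", "address", "email", "password",
   "passwd", "first_name", "last_name", "EmailAddress", "transaction_id"]

def remove_pii_data (data : List (List (List (String × String)))) (pii_keys : Option (List String)) : List (List (String × String)) :=
  let keys := match pii_keys with
    | none => piiDefault
    | some ks => ks
  data.foldl (fun cleaned_data record_tuple =>
    -- record = record_tuple[0]; IndexError on an empty tuple (excluded by Pre_)
    let record := (PySem.List.pyGet? record_tuple 0).getD []
    let filtered_record := record.filter (fun kv => !(keys.contains kv.1))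
    cleaned_data ++ [filtered_record]) []

-- ===== PORT B =====
def scrubRecord (record : List (String × String)) (keys : List String) : List (String × String) :=
  -- cleaned = dict(record); for key in keys: cleaned.pop(key, None)
  let cleaned := PySem.Dict.ofList record
  (keys.foldl (fun d key => d.erase key) cleaned).items

def remove_pii_data_alt (data : List (List (List (String × String)))) (pii_keys : Option (List String)) : List (List (String × String)) :=
  let keys := match pii_keys with
    | none => piiDefault
    | some ks => ks
  data.map (fun record_tuple => scrubRecord ((PySem.List.pyGet? record_tuple 0).getD []) keys)

-- ===== PRECONDITION & SPEC =====
-- Pre_ excludes (a) empty record tuples, on which A raises IndexError, and (b) records whose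
-- first dict carries duplicate keys in the association-list encoding — not a faithful image of
-- any Python dict (Python would have deduplicated at construction).
def Pre_remove_pii_data (data : List (List (List (String × String)))) (pii_keys : Option (List String)) : Prop :=
  ∀ t ∈ data, t ≠ [] ∧ ((t.headD []).map Prod.fst).Nodup
instance (data : List (List (List (String × String)))) (pii_keys : Option (List String)) : Decidable (Pre_remove_pii_data data pii_keys) := by unfold Pre_remove_pii_data; infer_instance

def pvWitness_remove_pii_data : (List (List (List (String × String)))) × Option (List String) :=
  ([[[("email", "a@b.c"), ("name", "n")], [("x", "1")]], [[("dob", "1990"), ("id", "7")]]], none)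

def Spec_remove_pii_data (data : List (List (List (String × String)))) (pii_keys : Option (List String)) (out : List (List (String × String))) : Prop := out = remove_pii_data_alt data pii_keys
instance (data : List (List (List (String × String)))) (pii_keys : Option (List String)) (out : List (List (String × String))) : Decidable (Spec_remove_pii_data data pii_keys out) := by unfold Spec_remove_pii_data; infer_instance

-- ===== CLAIM (what is proved, stated in full; the proofs are below) =====
def Claim_equal_remove_pii_data : Prop := ∀ (data : List (List (List (String × String)))) (pii_keys : Option (List String)), Dom_remove_pii_data data pii_keys → Pre_remove_pii_data data pii_keys → Spec_remove_pii_data data pii_keys (remove_pii_data data pii_keys)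

-- ===== LEMMAS AND PROOFS =====

-- dict(record): with duplicate-free keys, Dict.ofList is the identity on the item list
lemma dict_update_items_of_disjoint {κ ν : Type} [BEq κ] [LawfulBEq κ]
    (ps : List (κ × ν)) (d : PySem.Dict κ ν)
    (hdisj : ∀ k ∈ ps.map Prod.fst, d.contains k = false)
    (hnd : (ps.map Prod.fst).Nodup) :
    (d.update ps).items = d.items ++ ps := by
  induction ps generalizing d with
  | nil => simp [PySem.Dict.update]
  | cons p ps ih =>
    have hc : d.contains p.1 = false := hdisj p.1 (by simp)
    have hins : (d.insert p.1 p.2).items = d.items ++ [p] := by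
      simp [PySem.Dict.insert, hc]
    have hstep : (d.update (p :: ps)).items = ((d.insert p.1 p.2).update ps).items := by
      simp [PySem.Dict.update]
    rw [hstep, ih]
    · rw [hins, List.append_assoc]; rfl
    · intro k hk
      simp only [PySem.Dict.contains, hins, List.any_append, List.any_cons, List.any_nil,
        Bool.or_false, Bool.or_eq_false_iff]
      constructor
      · have := hdisj k (by simp at hk ⊢; right; exact hk)
        simpa [PySem.Dict.contains] using this
      · have hkne : p.1 ≠ k := by
          intro h; subst h
          exact (List.nodup_cons.mp (by simpa using hnd)).1 hk
        simp [hkne]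
    · exact (List.nodup_cons.mp (by simpa using hnd)).2

lemma ofList_items_of_nodup {κ ν : Type} [BEq κ] [LawfulBEq κ]
    (ps : List (κ × ν)) (hnd : (ps.map Prod.fst).Nodup) :
    (PySem.Dict.ofList ps).items = ps := by
  have := dict_update_items_of_disjoint ps PySem.Dict.empty
    (fun k _ => PySem.Dict.contains_empty k) hnd
  simpa [PySem.Dict.ofList, PySem.Dict.empty] using this

-- the pop loop: folding erase over the deny-list is one filter by non-membership
lemma foldl_erase_items {κ ν : Type} [BEq κ] [LawfulBEq κ]
    (ks : List κ) (d : PySem.Dict κ ν) :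
    (ks.foldl (fun d k => d.erase k) d).items
      = d.items.filter (fun kv => !(ks.contains kv.1)) := by
  induction ks generalizing d with
  | nil => simp
  | cons k ks ih =>
    simp only [List.foldl_cons]
    rw [ih]
    simp only [PySem.Dict.erase, List.filter_filter]
    apply List.filter_congr
    intro kv _
    by_cases h : kv.1 = k
    · subst h; simp
    · simp [h]

-- A's accumulation loop is a map
lemma remove_pii_data_eq_map (data : List (List (List (String × String)))) (keys : List String) :
    data.foldl (fun cleaned_data record_tuple =>
      cleaned_data ++ [((PySem.List.pyGet? record_tuple 0).getD []).filter
        (fun kv => !(keys.contains kv.1))]) []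
    = data.map (fun record_tuple =>
        ((PySem.List.pyGet? record_tuple 0).getD []).filter (fun kv => !(keys.contains kv.1))) := by
  simpa using PySem.List.foldl_append_singleton_eq_map
    (fun record_tuple : List (List (String × String)) =>
      ((PySem.List.pyGet? record_tuple 0).getD []).filter (fun kv => !(keys.contains kv.1)))
    data []

lemma scrubRecord_eq_filter (record : List (String × String)) (keys : List String)
    (hnd : (record.map Prod.fst).Nodup) :
    scrubRecord record keys = record.filter (fun kv => !(keys.contains kv.1)) := by
  unfold scrubRecord
  rw [foldl_erase_items, ofList_items_of_nodup record hnd]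

-- ===== VERDICT (by name: the statement is the Claim_ definition above) =====
theorem remove_pii_data_spec : Claim_equal_remove_pii_data := by
  intro data pii_keys _ hpre
  unfold Spec_remove_pii_data remove_pii_data remove_pii_data_alt
  rw [remove_pii_data_eq_map]
  apply List.map_congr_left
  intro t ht
  obtain ⟨hne, hnd⟩ := hpre t ht
  rw [scrubRecord_eq_filter]
  obtain ⟨r, rest, rfl⟩ := List.exists_cons_of_ne_nil hne
  simpa using hnd
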